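-- pv_equiv track=rewrite | github.com/EnVision-Research/HomoInterpGAN | util/util.py | list_reshape
-- ===== SOURCE A (Python) =====
-- def list_reshape(l, nRow):
--     '''
--     reshape a 1-d list to 2d
--     :param l: 1d list
--     :param nRow:
--     :return: 2d list
--     '''
--     nRow = int(nRow)
--     assert len(l) % nRow == 0, 'size mismatch, len(l)=%d, nRow=%d' % (len(l), nRow)
--     nCol = int(len(l) / nRow)
--     result = []
--     for i in range(nRow):
--         result += [l[i * nCol:(i + 1) * nCol]]
--     return result
-- ===== SOURCE B (Python) =====
-- def list_reshape(l, nRow):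
--     '''
--     reshape a 1-d list to 2d (single distribution pass)
--     '''
--     nRow = int(nRow)
--     assert len(l) % nRow == 0, 'size mismatch, len(l)=%d, nRow=%d' % (len(l), nRow)
--     nCol = int(len(l) / nRow)
--     result = [[] for _ in range(nRow)]
--     for idx, x in enumerate(l):
--         result[idx // nCol].append(x)
--     return result
-- ===== Notes on version B (the rewrite author's own statement) =====
-- stated objective: alternative
-- what changed: Instead of computing nRow slice bounds and taking contiguous slices, B preallocates nRow empty rows and makes one pass over the flat list, distributing each element into row idx // nCol.
-- outside the precondition, e.g. on list_reshape([1, 2], -2): A returns [], B raises IndexError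
import Mathlib
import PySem

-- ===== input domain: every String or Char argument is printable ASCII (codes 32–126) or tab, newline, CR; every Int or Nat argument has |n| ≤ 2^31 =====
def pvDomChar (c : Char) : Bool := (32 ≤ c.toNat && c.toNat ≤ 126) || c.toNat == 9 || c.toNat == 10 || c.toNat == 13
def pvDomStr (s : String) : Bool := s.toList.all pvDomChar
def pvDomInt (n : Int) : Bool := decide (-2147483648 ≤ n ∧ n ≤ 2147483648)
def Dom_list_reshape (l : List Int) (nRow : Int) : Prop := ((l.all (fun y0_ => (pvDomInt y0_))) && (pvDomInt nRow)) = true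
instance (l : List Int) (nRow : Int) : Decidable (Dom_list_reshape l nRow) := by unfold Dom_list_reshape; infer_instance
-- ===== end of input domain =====

-- B replaces A's nRow contiguous-slice loop by a single distribution pass over the
-- flat list into preallocated rows (alternative decomposition, same cost).


-- ===== PORT A =====
-- int(len(l) / nRow): exact float division followed by truncation; under Pre_ the
-- length is divisible by nRow, so it equals floor division, ported as floordiv.
def list_reshape (l : List Int) (nRow : Int) : List (List Int) :=
  let nCol : Int := PySem.Int.floordiv (PySem.List.len l) nRow
  (PySem.List.pyRange 0 nRow 1).foldl
    (fun result i => result ++ [PySem.List.slice l (some (i * nCol)) (some ((i + 1) * nCol))]) []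

-- ===== PORT B =====
-- result[idx // nCol].append(x): under Pre_ the index idx // nCol is nonnegative and
-- in range, so .toNat and List.modify are exact for Python's indexed assignment;
-- [[] for _ in range(nRow)] is replicate nRow.toNat [] (range of a negative is empty).
def list_reshape_alt (l : List Int) (nRow : Int) : List (List Int) :=
  let nCol : Int := PySem.Int.floordiv (PySem.List.len l) nRow
  (PySem.List.enumerate l 0).foldl
    (fun result p => result.modify (PySem.Int.floordiv p.1 nCol).toNat (fun row => row ++ [p.2]))
    (List.replicate nRow.toNat [])

-- ===== PRECONDITION & SPEC =====
-- Pre_ excludes nRow = 0 (A raises ZeroDivisionError) and lengths not divisible by nRow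
-- (A raises AssertionError); it also excludes negative nRow with a nonempty list, where
-- A's range() loop silently returns [] discarding all the data while B's distribution
-- pass raises IndexError.
def Pre_list_reshape (l : List Int) (nRow : Int) : Prop :=
  (1 ≤ nRow ∧ nRow ∣ (l.length : Int)) ∨ (l = [] ∧ nRow < 0)
instance (l : List Int) (nRow : Int) : Decidable (Pre_list_reshape l nRow) := by
  unfold Pre_list_reshape; infer_instance
def pvWitness_list_reshape : List Int × Int := ([1, 2, 3, 4, 5, 6], 2)

def Spec_list_reshape (l : List Int) (nRow : Int) (out : List (List Int)) : Prop := out = list_reshape_alt l nRow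
instance (l : List Int) (nRow : Int) (out : List (List Int)) : Decidable (Spec_list_reshape l nRow out) := by unfold Spec_list_reshape; infer_instance

-- ===== CLAIM (what is proved, stated in full; the proofs are below) =====
def Claim_equal_list_reshape : Prop := ∀ (l : List Int) (nRow : Int), Dom_list_reshape l nRow → Pre_list_reshape l nRow → Spec_list_reshape l nRow (list_reshape l nRow)

-- ===== LEMMAS AND PROOFS =====

-- the common intermediate value: m chunks of width c, taken off the front of l
def pvChunk (c : Nat) : Nat → List Int → List (List Int)
  | 0, _ => []
  | m + 1, l => l.take c :: pvChunk c m (l.drop c)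

theorem pvChunk_nil (c m : Nat) : pvChunk c m [] = List.replicate m [] := by
  induction m with
  | zero => rfl
  | succ m ih => simp [pvChunk, ih, List.replicate_succ]

theorem pv_foldl_append {α β : Type} (f : α → β) :
    ∀ (xs : List α) (acc : List β),
      xs.foldl (fun r i => r ++ [f i]) acc = acc ++ xs.map f := by
  intro xs
  induction xs with
  | nil => simp
  | cons x xs ih => intro acc; simp [List.foldl_cons, ih]

theorem pv_map_range_chunk (c : Nat) :
    ∀ (m : Nat) (l : List Int),
      (List.range m).map (fun k => (l.drop (k * c)).take c) = pvChunk c m l := by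
  intro m
  induction m with
  | zero => intro l; simp [pvChunk]
  | succ m ih =>
      intro l
      rw [List.range_succ_eq_map]
      simp only [List.map_cons, List.map_map, Nat.zero_mul, List.drop_zero, pvChunk]
      congr 1
      rw [← ih (l.drop c)]
      apply List.map_congr_left
      intro k _
      simp only [Function.comp_apply, List.drop_drop]
      congr 2
      rw [Nat.succ_mul]
      ring

-- the body of B's fold
def pvBody (c : Int) (r : List (List Int)) (p : Int × Int) : List (List Int) :=
  r.modify (PySem.Int.floordiv p.1 c).toNat (fun row => row ++ [p.2])

theorem pv_enumerate_append (a b : List Int) :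
    ∀ (s : Int), PySem.List.enumerate (a ++ b) s
      = PySem.List.enumerate a s ++ PySem.List.enumerate b (s + a.length) := by
  induction a with
  | nil => intro s; simp [PySem.List.enumerate_nil]
  | cons x xs ih =>
      intro s
      simp only [List.cons_append, PySem.List.enumerate_cons, ih (s + 1), List.length_cons]
      congr 3
      push_cast; ring

-- fill: while the index stays below c, every element is appended to the first bucket
theorem pv_fill (c : Nat) :
    ∀ (xs : List Int) (j : Nat), j + xs.length ≤ c →
      ∀ (b : List Int) (bs : List (List Int)),
        (PySem.List.enumerate xs (j : Int)).foldl (pvBody (c : Int)) (b :: bs)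
          = (b ++ xs) :: bs := by
  intro xs
  induction xs with
  | nil => intro j _ b bs; simp [PySem.List.enumerate_nil]
  | cons x xs ih =>
      intro j hj b bs
      rw [PySem.List.enumerate_cons, List.foldl_cons]
      have hjc : j < c := by simp at hj; omega
      have hdiv : j / c = 0 := Nat.div_eq_of_lt hjc
      have hbody : pvBody (c : Int) (b :: bs) ((j : Int), x) = (b ++ [x]) :: bs := by
        simp [pvBody, PySem.Int.floordiv_natCast, hdiv]
      rw [hbody]
      have : ((j : Int) + 1) = ((j + 1 : Nat) : Int) := by push_cast; ring
      rw [this, ih (j + 1) (by simp at hj ⊢; omega) (b ++ [x]) bs]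
      simp
-- shift: once the index has passed c, the first bucket is never touched again
theorem pv_shift (c : Nat) (hc : 0 < c) :
    ∀ (xs : List Int) (j : Nat) (b : List Int) (bs : List (List Int)),
      (PySem.List.enumerate xs ((c + j : Nat) : Int)).foldl (pvBody (c : Int)) (b :: bs)
        = b :: (PySem.List.enumerate xs (j : Int)).foldl (pvBody (c : Int)) bs := by
  intro xs
  induction xs with
  | nil => intro j b bs; simp [PySem.List.enumerate_nil]
  | cons x xs ih =>
      intro j b bs
      rw [PySem.List.enumerate_cons, PySem.List.enumerate_cons, List.foldl_cons, List.foldl_cons]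
      have hdiv : (c + j) / c = j / c + 1 := by
        rw [Nat.add_comm c j, Nat.add_div_right _ hc]
      have hfd : (PySem.Int.floordiv ((c + j : Nat) : Int) (c : Int)).toNat = j / c + 1 := by
        rw [PySem.Int.floordiv_natCast, hdiv]; exact Int.toNat_natCast _
      have hfd' : (PySem.Int.floordiv ((j : Nat) : Int) (c : Int)).toNat = j / c := by
        rw [PySem.Int.floordiv_natCast]; exact Int.toNat_natCast _
      have hbody : pvBody (c : Int) (b :: bs) (((c + j : Nat) : Int), x)
          = b :: pvBody (c : Int) bs ((j : Int), x) := by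
        simp only [pvBody]
        rw [hfd, hfd']
        rfl
      rw [hbody]
      have h1 : (((c + j : Nat) : Int) + 1) = ((c + (j + 1) : Nat) : Int) := by push_cast; ring
      have h2 : ((j : Int) + 1) = ((j + 1 : Nat) : Int) := by push_cast; ring
      rw [h1, h2, ih (j + 1)]

-- B's fold distributes l into pvChunk
theorem pv_dist (c : Nat) (hc : 0 < c) :
    ∀ (m : Nat) (l : List Int), l.length = m * c →
      (PySem.List.enumerate l 0).foldl (pvBody (c : Int)) (List.replicate m [])
        = pvChunk c m l := by
  intro m
  induction m with
  | zero =>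
      intro l hl
      simp at hl
      simp [hl, PySem.List.enumerate_nil, pvChunk]
  | succ m ih =>
      intro l hl
      have hl' : l.length = m * c + c := by rw [hl]; ring
      have hlen : (l.take c).length = c := by
        simp [List.length_take]; omega
      have hsplit : l = l.take c ++ l.drop c := (List.take_append_drop c l).symm
      conv_lhs => rw [hsplit]
      rw [pv_enumerate_append, List.foldl_append, List.replicate_succ]
      have h0 : (0 : Int) = ((0 : Nat) : Int) := rfl
      rw [h0, pv_fill c (l.take c) 0 (by omega) [] (List.replicate m [])]
      simp only [List.nil_append]
      have hstart : ((0 : Nat) : Int) + ((l.take c).length : Int) = ((c + 0 : Nat) : Int) := by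
        rw [hlen]; push_cast; ring
      rw [hstart, pv_shift c hc (l.drop c) 0]
      simp only [Nat.cast_zero]
      rw [ih (l.drop c) (by simp [List.length_drop]; omega)]
      simp [pvChunk]

-- A's port, reduced to pvChunk
theorem pvA_eq (l : List Int) (m c : Nat) :
    (PySem.List.pyRange 0 (m : Int) 1).foldl
      (fun result i => result ++ [PySem.List.slice l (some (i * (c : Int))) (some ((i + 1) * (c : Int)))]) []
      = pvChunk c m l := by
  rw [pv_foldl_append]
  rw [PySem.List.pyRange_one]
  simp only [List.map_map, List.nil_append, sub_zero, Int.toNat_natCast]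
  rw [← pv_map_range_chunk c m l]
  apply List.map_congr_left
  intro k _
  simp only [Function.comp_apply, zero_add]
  have h1 : (k : Int) * (c : Int) = ((k * c : Nat) : Int) := by push_cast; ring
  have h2 : ((k : Int) + 1) * (c : Int) = ((k * c + c : Nat) : Int) := by push_cast; ring
  rw [h1, h2, PySem.List.slice_natCast]
  congr 1
  omega

theorem list_reshape_spec_aux (l : List Int) (nRow : Int)
    (h : Pre_list_reshape l nRow) : list_reshape l nRow = list_reshape_alt l nRow := by
  rcases h with ⟨h1, hdvd⟩ | ⟨hl, hneg⟩
  · -- nRow ≥ 1 and nRow divides the length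
    set m : Nat := nRow.toNat with hm
    have hnr : nRow = (m : Int) := by omega
    have hm0 : 0 < m := by omega
    -- the common column width
    obtain ⟨q, hq⟩ := hdvd
    have hq0 : 0 ≤ q := by nlinarith [Int.natCast_nonneg l.length]
    set c : Nat := q.toNat with hc
    have hqc : q = (c : Int) := by omega
    have hlen : l.length = m * c := by
      have : (l.length : Int) = (m : Int) * (c : Int) := by rw [← hnr, ← hqc]; exact hq
      exact_mod_cast this
    have hcol : PySem.Int.floordiv (PySem.List.len l) ((m : Nat) : Int) = (c : Int) := by
      rw [PySem.List.len_eq]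
      have : (l.length : Int) = ((m * c : Nat) : Int) := congrArg (fun n : Nat => (n : Int)) hlen
      rw [this, PySem.Int.floordiv_natCast]
      congr 1
      rw [Nat.mul_div_cancel_left c hm0]
    unfold list_reshape list_reshape_alt
    rw [hnr]
    simp only [hcol, Int.toNat_natCast]
    rw [pvA_eq l m c]
    by_cases hnil : l = []
    · -- empty list: both sides are m empty rows
      subst hnil
      simp [pvChunk_nil, PySem.List.enumerate_nil]
    · have hc0 : 0 < c := by
        rcases Nat.eq_zero_or_pos c with h0 | h0
        · exfalso; apply hnil; rw [← List.length_eq_zero_iff, hlen, h0, Nat.mul_zero]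
        · exact h0
      rw [← pv_dist c hc0 m l hlen]
      rfl
  · -- empty list with negative nRow: both return []
    subst hl
    have : nRow.toNat = 0 := by omega
    simp [list_reshape, list_reshape_alt, PySem.List.enumerate_nil, this,
      PySem.List.pyRange_one_eq_nil (by omega : nRow ≤ 0)]

-- ===== VERDICT (by name: the statement is the Claim_ definition above) =====
theorem list_reshape_spec : Claim_equal_list_reshape := by
  intro l nRow _ hpre
  unfold Spec_list_reshape
  exact list_reshape_spec_aux l nRow hpre
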